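-- pv_equiv track=rewrite | github.com/shotah/PythonInterviewStudy | p2 copy.py | find_time_for_slowest_truck
-- ===== SOURCE A (Python) =====
-- def find_time_for_slowest_truck(types):
--     all_garbage = "".join(types)
--     collection = {}
--     for g in all_garbage:
--         if g in collection:
--             collection[g] +=1
--         else:
--             collection[g] = 1
--     most_garabage = max(collection, key=collection.get)
--     return collection[most_garabage]
-- ===== SOURCE B (Python) =====
-- def find_time_for_slowest_truck(types):
--     chars = sorted("".join(types))
--     best = 0
--     run = 0
--     prev = None
--     for c in chars:
--         run = run + 1 if c == prev else 1
--         if run > best: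
--             best = run
--         prev = c
--     return best
-- ===== Notes on version B (the rewrite author's own statement) =====
-- stated objective: alternative
-- what changed: Replaces A's dict-of-counts plus max-by-value lookup with sort-then-scan: join the strings, sort the characters, and one linear pass tracks the current run length and the running maximum run, which for a sorted sequence is the maximum character frequency.
import Mathlib
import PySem

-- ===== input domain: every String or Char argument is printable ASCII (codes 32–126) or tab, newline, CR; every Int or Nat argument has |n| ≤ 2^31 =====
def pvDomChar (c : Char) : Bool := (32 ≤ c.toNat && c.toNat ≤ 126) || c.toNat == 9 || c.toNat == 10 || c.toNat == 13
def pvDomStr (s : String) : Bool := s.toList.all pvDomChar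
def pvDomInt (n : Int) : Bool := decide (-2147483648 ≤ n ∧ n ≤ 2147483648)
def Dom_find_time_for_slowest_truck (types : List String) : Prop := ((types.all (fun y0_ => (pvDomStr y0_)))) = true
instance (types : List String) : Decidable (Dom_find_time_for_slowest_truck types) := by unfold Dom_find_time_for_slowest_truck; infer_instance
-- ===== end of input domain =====

-- B replaces A's dict-of-counts + max-by-value with sort-then-scan over the joined characters (alternative algorithm, same return value on Pre_; A raises ValueError when every string is empty — excluded by Pre_).


-- ===== PORT A =====
-- A's loop body: if g in collection: collection[g] += 1 else: collection[g] = 1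
def pvStepA (d : PySem.Dict Char Int) (g : Char) : PySem.Dict Char Int :=
  if d.contains g then d.insert g (d.getD g 0 + 1) else d.insert g 1

def find_time_for_slowest_truck (types : List String) : Int :=
  let all_garbage := PySem.Str.join "" types
  let collection := all_garbage.toList.foldl pvStepA PySem.Dict.empty
  -- max(collection, key=collection.get); raises ValueError when collection is empty (excluded by Pre_)
  match PySem.List.max? collection.keys (fun k => collection.getD k 0) with
  | some most_garabage => collection.getD most_garabage 0
  | none => 0

-- ===== PORT B =====
-- B's loop body over state (best, run, prev): run = run+1 if c == prev else 1; best updated; prev = c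
def pvStepB (st : Int × Int × Option Char) (c : Char) : Int × Int × Option Char :=
  let run : Int := if some c = st.2.2 then st.2.1 + 1 else 1
  let best : Int := if run > st.1 then run else st.1
  (best, run, some c)

def find_time_for_slowest_truck_alt (types : List String) : Int :=
  let chars := PySem.List.sorted (PySem.Str.join "" types).toList (fun c => c) false
  (chars.foldl pvStepB (0, 0, none)).1

-- ===== PRECONDITION & SPEC =====
-- Pre_ excludes exactly the inputs where every string is empty: there A's max() over the empty dict raises ValueError.
def Pre_find_time_for_slowest_truck (types : List String) : Prop := ∃ s ∈ types, s ≠ ""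
instance (types : List String) : Decidable (Pre_find_time_for_slowest_truck types) := by unfold Pre_find_time_for_slowest_truck; infer_instance
def pvWitness_find_time_for_slowest_truck : List String := ["ab", "b"]

def Spec_find_time_for_slowest_truck (types : List String) (out : Int) : Prop := out = find_time_for_slowest_truck_alt types
instance (types : List String) (out : Int) : Decidable (Spec_find_time_for_slowest_truck types out) := by unfold Spec_find_time_for_slowest_truck; infer_instance

-- ===== CLAIM (what is proved, stated in full; the proofs are below) =====
def Claim_equal_find_time_for_slowest_truck : Prop := ∀ (types : List String), Dom_find_time_for_slowest_truck types → Pre_find_time_for_slowest_truck types → Spec_find_time_for_slowest_truck types (find_time_for_slowest_truck types)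

-- ===== LEMMAS AND PROOFS =====

-- "".join over List Char is flatten
lemma pv_join_empty (ps : List (List Char)) : PySem.Chars.join [] ps = ps.flatten := by
  unfold PySem.Chars.join List.intercalate
  induction ps with
  | nil => rfl
  | cons a t ih =>
    cases t with
    | nil => simp
    | cons b u => simp_all [List.intersperse]

-- the shared value: the max over per-position character counts
def pvM (l : List Char) : Int := (l.map (fun d => (l.count d : Int))).foldl max 0

lemma pvM_perm {l l' : List Char} (h : l.Perm l') : pvM l = pvM l' := by
  unfold pvM
  have h1 : l.map (fun d => (l.count d : Int)) = l.map (fun d => (l'.count d : Int)) := by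
    apply List.map_congr_left
    intro d _
    rw [h.count_eq]
  rw [h1]
  have hperm : (l.map (fun d => (l'.count d : Int))).Perm (l'.map (fun d => (l'.count d : Int))) := h.map _
  have : RightCommutative (fun (a b : Int) => max a b) := ⟨fun b a1 a2 => max_right_comm b a1 a2⟩
  exact hperm.foldl_eq 0

-- changing a max-fold's seed component does not matter when some list element dominates both
lemma pv_foldl_max_absorb (xs : List Int) : ∀ (b x y : Int), (∃ z ∈ xs, x ≤ z ∧ y ≤ z) → xs.foldl max (max b x) = xs.foldl max (max b y) := by
  induction xs with
  | nil => intro b x y ⟨z, hz, _⟩; exact absurd hz (List.not_mem_nil)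
  | cons a t ih =>
    intro b x y ⟨z, hz, hx, hy⟩
    simp only [List.foldl_cons]
    rcases List.mem_cons.mp hz with rfl | hzt
    · have h1 : max (max b x) z = max b z := by rw [max_assoc, max_eq_right hx]
      have h2 : max (max b y) z = max b z := by rw [max_assoc, max_eq_right hy]
      rw [h1, h2]
    · rw [max_right_comm b x a, max_right_comm b y a]
      exact ih (max b a) x y ⟨z, hzt, hx, hy⟩

-- the scan invariant: over a sorted tail whose elements all dominate prev, B's fold computes
-- the max over per-position counts, the run of prev credited with r
lemma pv_scan_inv (l : List Char) : ∀ (b r : Int) (p : Char), l.Pairwise (· ≤ ·) → (∀ d ∈ l, p ≤ d) →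
    (l.foldl pvStepB (b, r, some p)).1
      = (l.map (fun d => (l.count d : Int) + if d = p then r else 0)).foldl max b := by
  induction l with
  | nil => intro b r p _ _; rfl
  | cons c t ih =>
    intro b r p hl hp
    rw [List.pairwise_cons] at hl
    obtain ⟨hct, htp⟩ := hl
    simp only [List.foldl_cons, List.map_cons]
    by_cases hc : c = p
    · subst hc
      have hstep : pvStepB (b, r, some c) c = (max b (r + 1), r + 1, some c) := by
        simp [pvStepB]; omega
      rw [hstep, ih (max b (r + 1)) (r + 1) c htp hct]
      have hmap : t.map (fun d => ((c :: t).count d : Int) + if d = c then r else 0)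
          = t.map (fun d => (t.count d : Int) + if d = c then r + 1 else 0) := by
        apply List.map_congr_left
        intro d _
        by_cases hdc : d = c
        · subst hdc
          simp
          omega
        · have : ¬ (c = d) := fun h => hdc h.symm
          simp [hdc, this]
      rw [hmap]
      have hhead : ((c :: t).count c : Int) + (if c = c then r else 0) = (t.count c : Int) + 1 + r := by
        simp
      rw [hhead]
      by_cases hmem : c ∈ t
      · exact pv_foldl_max_absorb _ b (r + 1) ((t.count c : Int) + 1 + r)
          ⟨(t.count c : Int) + (r + 1), List.mem_map.mpr ⟨c, hmem, by simp⟩,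
           by have := Int.natCast_nonneg (t.count c); omega,
           by omega⟩
      · have h0 : t.count c = 0 := List.count_eq_zero.mpr hmem
        rw [h0]
        norm_num [add_comm]
    · have hstep : pvStepB (b, r, some p) c = (max b 1, 1, some c) := by
        simp [pvStepB, hc]
        omega
      rw [hstep, ih (max b 1) 1 c htp hct]
      have hplt : p < c := lt_of_le_of_ne (hp c List.mem_cons_self) (fun h => hc h.symm)
      have hmap : t.map (fun d => ((c :: t).count d : Int) + if d = p then r else 0)
          = t.map (fun d => (t.count d : Int) + if d = c then 1 else 0) := by
        apply List.map_congr_left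
        intro d hd
        have hdp : d ≠ p := fun h => absurd (h ▸ hct d hd) (not_le.mpr hplt)
        by_cases hdc : d = c
        · subst hdc
          simp [hdp]
        · have : ¬ (c = d) := fun h => hdc h.symm
          simp [hdc, hdp, this]
      rw [hmap]
      have hhead : ((c :: t).count c : Int) + (if c = p then r else 0) = (t.count c : Int) + 1 := by
        simp [hc]
      rw [hhead]
      by_cases hmem : c ∈ t
      · exact pv_foldl_max_absorb _ b 1 ((t.count c : Int) + 1)
          ⟨(t.count c : Int) + 1, List.mem_map.mpr ⟨c, hmem, by simp⟩,
           by have := Int.natCast_nonneg (t.count c); omega, le_refl _⟩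
      · have h0 : t.count c = 0 := List.count_eq_zero.mpr hmem
        rw [h0]
        norm_num

lemma pv_B_eq_M (cs : List Char) (h : cs ≠ []) :
    ((PySem.List.sorted cs (fun c => c) false).foldl pvStepB (0, 0, none)).1 = pvM cs := by
  have hperm := PySem.List.sorted_perm cs (fun c => c) false
  rw [← pvM_perm hperm]
  have hpw := PySem.List.sorted_pairwise cs (fun c => c)
  cases hscs : PySem.List.sorted cs (fun c => c) false with
  | nil => exact absurd ((PySem.List.sorted_eq_nil_iff cs _ false).mp hscs) h
  | cons c t =>
    rw [hscs] at hpw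
    rw [List.pairwise_cons] at hpw
    obtain ⟨hct, htp⟩ := hpw
    rw [List.foldl_cons]
    have hstep : pvStepB (0, 0, none) c = (1, 1, some c) := by simp [pvStepB]
    rw [hstep, pv_scan_inv t 1 1 c htp hct]
    unfold pvM
    simp only [List.map_cons, List.foldl_cons]
    have hmap : t.map (fun d => ((c :: t).count d : Int))
        = t.map (fun d => (t.count d : Int) + if d = c then 1 else 0) := by
      apply List.map_congr_left
      intro d _
      by_cases hdc : d = c
      · subst hdc; simp
      · have : ¬ (c = d) := fun h => hdc h.symm
        simp [hdc, this]
    rw [hmap]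
    have hhead : max 0 ((c :: t).count c : Int) = max 1 ((t.count c : Int) + 1) := by
      simp
      omega
    rw [hhead]
    by_cases hmem : c ∈ t
    · have habs := pv_foldl_max_absorb (t.map fun d => (t.count d : Int) + if d = c then 1 else 0) 1 1
        ((t.count c : Int) + 1)
        ⟨(t.count c : Int) + 1, List.mem_map.mpr ⟨c, hmem, by simp⟩,
         by have := Int.natCast_nonneg (t.count c); omega, le_refl _⟩
      simpa using habs
    · have h0 : t.count c = 0 := List.count_eq_zero.mpr hmem
      rw [h0]
      norm_num

lemma pv_A_eq_M (cs : List Char) (h : cs ≠ []) :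
    (match PySem.List.max? ((cs.foldl pvStepA PySem.Dict.empty).keys)
        (fun k => (cs.foldl pvStepA PySem.Dict.empty).getD k 0) with
     | some m => (cs.foldl pvStepA PySem.Dict.empty).getD m 0
     | none => 0) = pvM cs := by
  have hfold : cs.foldl pvStepA PySem.Dict.empty
      = cs.foldl (fun d x => d.insert x (d.getD x 0 + 1)) PySem.Dict.empty := by
    apply PySem.List.foldl_congr_mem
    intro acc x _
    unfold pvStepA
    by_cases hc : acc.contains x
    · simp [hc]
    · rw [if_neg (by simp [hc]), PySem.Dict.getD_of_not_contains acc 0 (by simpa using hc)]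
      norm_num
  rw [hfold, PySem.Dict.foldl_insert_getD_add_one_eq_counter, PySem.Dict.keys_counter]
  cases hmax : PySem.List.max? (PySem.Set.ofList cs) (fun k => (PySem.Dict.counter cs).getD k 0) with
  | none =>
    exfalso
    have hnil := (PySem.List.max?_eq_none_iff _ _).mp hmax
    obtain ⟨x, hx⟩ := List.exists_mem_of_ne_nil cs h
    exact absurd (hnil ▸ (PySem.Set.mem_ofList cs x).mpr hx) (List.not_mem_nil)
  | some m =>
    have hmem : m ∈ cs := (PySem.Set.mem_ofList cs m).mp (PySem.List.max?_mem hmax)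
    have hisMax := PySem.List.max?_isMax hmax
    simp only [PySem.Dict.getD_counter] at hisMax ⊢
    -- pvM cs = count m
    unfold pvM
    rw [List.foldl_map]
    have hub : ∀ y ∈ cs, (cs.count y : Int) ≤ (cs.count m : Int) := by
      intro y hy
      exact hisMax y ((PySem.Set.mem_ofList cs y).mpr hy)
    have hlb := (PySem.List.le_foldl_max_int cs (fun d => (cs.count d : Int)) 0).2 m hmem
    have hcases := PySem.List.foldl_max_mem (cs.map (fun d => (cs.count d : Int))) 0
    rw [List.foldl_map] at hcases
    rcases hcases with h0 | hmm
    · have hpos : 0 < cs.count m := List.count_pos_iff.mpr hmem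
      omega
    · obtain ⟨d, hd, hdeq⟩ := List.mem_map.mp hmm
      rw [← hdeq] at hlb ⊢
      exact le_antisymm (hdeq ▸ hub d hd) hlb |>.symm ▸ (le_antisymm (hdeq ▸ hub d hd) hlb).symm

-- the joined character list is nonempty exactly on Pre_
lemma pv_cs_ne_nil (types : List String) (hpre : ∃ s ∈ types, s ≠ "") :
    (PySem.Str.join "" types).toList ≠ [] := by
  rw [PySem.Str.toList_join]
  have : ("" : String).toList = [] := rfl
  rw [this, pv_join_empty]
  obtain ⟨s, hs, hne⟩ := hpre
  intro hnil
  rw [List.flatten_eq_nil_iff] at hnil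
  exact hne (String.toList_eq_nil_iff.mp (hnil s.toList (List.mem_map.mpr ⟨s, hs, rfl⟩)))

-- ===== VERDICT (by name: the statement is the Claim_ definition above) =====
theorem find_time_for_slowest_truck_spec : Claim_equal_find_time_for_slowest_truck := by
  intro types _ hpre
  unfold Spec_find_time_for_slowest_truck find_time_for_slowest_truck find_time_for_slowest_truck_alt
  have hne := pv_cs_ne_nil types hpre
  simp only []
  rw [pv_A_eq_M _ hne, pv_B_eq_M _ hne]
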